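-- pv_equiv track=rewrite | github.com/AliceHincu/Crypto | lab2/hill_cipher.py | get_message_vector
-- ===== SOURCE A (Python) =====
-- M = 2
--
-- def get_message_vector(message):
--     k = 0
--     message_size = len(message) // M if len(message) % M == 0 else len(message) // M + 1
--     message_vector = [[0] * M for _ in range(message_size)]
--
--     for i in range(message_size):
--         for j in range(M):
--             if k >= len(message):
--                 message_vector[i][j] = 0
--             else:
--                 message_vector[i][j] = ord(message[k]) % 65 + 1
--             k += 1
--
--     return message_vector
-- ===== SOURCE B (Python) =====
-- M = 2
--
-- def get_message_vector(message):
--     vals = [ord(c) % 65 + 1 for c in message]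
--     vals += [0] * ((-len(vals)) % M)
--     return [vals[i:i + M] for i in range(0, len(vals), M)]
-- ===== Notes on version B (the rewrite author's own statement) =====
-- stated objective: simpler
-- what changed: Replaces the preallocated matrix, manual index counter k and per-cell bounds check with a flat map of the character codes, an explicit zero pad to a multiple of M, and a chunking pass.
import Mathlib
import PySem

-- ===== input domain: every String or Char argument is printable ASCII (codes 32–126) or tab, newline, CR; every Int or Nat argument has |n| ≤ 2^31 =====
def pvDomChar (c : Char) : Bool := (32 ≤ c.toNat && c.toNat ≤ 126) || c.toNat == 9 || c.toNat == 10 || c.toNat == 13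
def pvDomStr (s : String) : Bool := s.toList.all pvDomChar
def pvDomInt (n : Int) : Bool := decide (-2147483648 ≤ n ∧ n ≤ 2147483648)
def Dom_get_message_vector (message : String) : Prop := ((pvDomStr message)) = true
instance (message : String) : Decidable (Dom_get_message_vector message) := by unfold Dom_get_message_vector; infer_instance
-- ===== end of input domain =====

-- B replaces A's preallocated matrix + index counter + per-cell bounds check by
-- map-pad-chunk; same values, objective: simpler.

-- ===== PORT A =====
-- `message_vector[i][j] = x` on a list of lists:
def pvSetCell (mv : List (List Int)) (i j : Nat) (x : Int) : List (List Int) :=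
  mv.set i ((mv.getD i []).set j x)

def get_message_vector (message : String) : List (List Int) :=
  let chars := message.toList
  let n := chars.length
  -- message_size = len(message)//M if len(message)%M==0 else len(message)//M + 1  (M = 2, len ≥ 0)
  let size := if n % 2 = 0 then n / 2 else n / 2 + 1
  -- message_vector = [[0]*M for _ in range(message_size)]
  let init : List (List Int) := (List.range size).map (fun _ => [0, 0])
  -- for i in range(message_size): for j in range(M): …; k starts at 0
  let res := (List.range size).foldl
    (fun (st : List (List Int) × Nat) i =>
      (List.range 2).foldl
        (fun (st : List (List Int) × Nat) j =>
          let x : Int := if st.2 ≥ n then 0 else ((chars.getD st.2 ' ').toNat : Int) % 65 + 1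
          (pvSetCell st.1 i j x, st.2 + 1))
        st)
    (init, 0)
  res.1

-- ===== PORT B =====
-- [vals[i:i+M] for i in range(0, len(vals), M)] with M = 2 and len(vals) even
def pvChunk2 : List Int → List (List Int)
  | [] => []
  | [a] => [[a]]
  | a :: b :: rest => [a, b] :: pvChunk2 rest

def get_message_vector_alt (message : String) : List (List Int) :=
  let vals : List Int := message.toList.map (fun c => ((c.toNat : Int) % 65 + 1))
  let vals' := vals ++ List.replicate (PySem.Int.mod (-(vals.length : Int)) 2).toNat 0
  pvChunk2 vals'

-- ===== PRECONDITION & SPEC =====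
def Spec_get_message_vector (message : String) (out : List (List Int)) : Prop := out = get_message_vector_alt message
instance (message : String) (out : List (List Int)) : Decidable (Spec_get_message_vector message out) := by unfold Spec_get_message_vector; infer_instance

-- ===== CLAIM (what is proved, stated in full; the proofs are below) =====
def Claim_equal_get_message_vector : Prop := ∀ (message : String), Dom_get_message_vector message → Spec_get_message_vector message (get_message_vector message)

-- ===== LEMMAS AND PROOFS =====

-- value of cell k for character list cs
def pvG (cs : List Char) (k : Nat) : Int :=
  if k ≥ cs.length then 0 else ((cs.getD k ' ').toNat : Int) % 65 + 1

def pvRow (cs : List Char) (i : Nat) : List Int := [pvG cs (2 * i), pvG cs (2 * i + 1)]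

theorem pvA_aux (cs : List Char) (c : Nat) :
    ∀ (m : Nat) (pre post : List (List Int)), pre.length = m →
    (List.range' m c).foldl
      (fun (st : List (List Int) × Nat) i =>
        (List.range 2).foldl
          (fun (st : List (List Int) × Nat) j =>
            let x : Int := if st.2 ≥ cs.length then 0 else ((cs.getD st.2 ' ').toNat : Int) % 65 + 1
            (pvSetCell st.1 i j x, st.2 + 1))
          st)
      (pre ++ List.replicate c [0, 0] ++ post, 2 * m)
    = (pre ++ (List.range' m c).map (pvRow cs) ++ post, 2 * (m + c)) := by
  induction c with
  | zero => intro m pre post _; simp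
  | succ c ih =>
    intro m pre post hm
    rw [List.range'_succ, List.foldl_cons]
    have h2 : List.range 2 = [0, 1] := by decide
    have hset0 : pvSetCell (pre ++ List.replicate (c + 1) [0, 0] ++ post) m 0 (pvG cs (2 * m))
        = pre ++ ([pvG cs (2 * m), 0] :: List.replicate c [0, 0]) ++ post := by
      simp [pvSetCell, List.replicate_succ, List.getD, ← hm, List.set_append_right]
    have hset1 : pvSetCell (pre ++ ([pvG cs (2 * m), 0] :: List.replicate c [0, 0]) ++ post) m 1
          (pvG cs (2 * m + 1))
        = (pre ++ [pvRow cs m]) ++ List.replicate c [0, 0] ++ post := by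
      simp [pvSetCell, pvRow, List.getD, ← hm, List.set_append_right]
    have step :
        (List.range 2).foldl
          (fun (st : List (List Int) × Nat) j =>
            let x : Int := if st.2 ≥ cs.length then 0 else ((cs.getD st.2 ' ').toNat : Int) % 65 + 1
            (pvSetCell st.1 m j x, st.2 + 1))
          (pre ++ List.replicate (c + 1) [0, 0] ++ post, 2 * m)
        = ((pre ++ [pvRow cs m]) ++ List.replicate c [0, 0] ++ post, 2 * (m + 1)) := by
      rw [h2]
      simp only [List.foldl_cons, List.foldl_nil]
      have g0 : (if 2 * m ≥ cs.length then (0:Int) else ((cs.getD (2*m) ' ').toNat : Int) % 65 + 1)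
          = pvG cs (2 * m) := rfl
      have g1 : (if 2 * m + 1 ≥ cs.length then (0:Int) else ((cs.getD (2*m+1) ' ').toNat : Int) % 65 + 1)
          = pvG cs (2 * m + 1) := rfl
      simp only [g0, g1]
      rw [hset0, hset1]
      simp only [Prod.mk.injEq]
      exact ⟨by trivial, by omega⟩
    rw [step, ih (m + 1) (pre ++ [pvRow cs m]) post (by simp [hm])]
    simp only [List.map_cons, Prod.mk.injEq, List.append_assoc, List.cons_append]
    exact ⟨by trivial, by omega⟩

theorem pvA_eq (message : String) :
    get_message_vector message
    = (List.range (if message.toList.length % 2 = 0 then message.toList.length / 2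
        else message.toList.length / 2 + 1)).map (pvRow message.toList) := by
  unfold get_message_vector
  dsimp only
  have h := pvA_aux message.toList
    (if message.toList.length % 2 = 0 then message.toList.length / 2
      else message.toList.length / 2 + 1) 0 [] [] rfl
  simp only [List.nil_append, List.append_nil, Nat.mul_zero] at h
  have hinit : (List.range (if message.toList.length % 2 = 0 then message.toList.length / 2
      else message.toList.length / 2 + 1)).map (fun _ => ([0, 0] : List Int))
      = List.replicate (if message.toList.length % 2 = 0 then message.toList.length / 2
        else message.toList.length / 2 + 1) [0, 0] := by
    simp
  rw [← List.range_eq_range'] at h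
  rw [hinit, h]

theorem pvPad_eq (n : Nat) : (PySem.Int.mod (-(n : Int)) 2).toNat = n % 2 := by
  rw [PySem.Int.mod_eq_emod_of_pos (by omega)]
  omega

-- B-side characterisation
theorem pvChunk2_pad (l : List Int) :
    pvChunk2 (l ++ List.replicate (l.length % 2) 0)
    = (List.range ((l.length + 1) / 2)).map
        (fun i => [l.getD (2 * i) 0, l.getD (2 * i + 1) 0]) := by
  induction l using pvChunk2.induct with
  | case1 => decide
  | case2 a => simp [pvChunk2, List.range_succ, List.getD]
  | case3 a b rest ih =>
    have hmod : (a :: b :: rest).length % 2 = rest.length % 2 := by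
      simp only [List.length_cons]; omega
    have hlen : ((a :: b :: rest).length + 1) / 2 = (rest.length + 1) / 2 + 1 := by
      simp only [List.length_cons]; omega
    rw [hmod, hlen]
    simp only [List.cons_append, pvChunk2, ih, List.range_succ_eq_map,
      List.map_cons, List.map_map]
    congr 1


theorem pvGetD_map (cs : List Char) (k : Nat) :
    ((cs.map (fun c => ((c.toNat : Int) % 65 + 1))).getD k 0) = pvG cs k := by
  induction cs generalizing k with
  | nil => simp [pvG]
  | cons c cs ih =>
    cases k with
    | zero => simp [pvG]
    | succ k => simp only [List.map_cons, List.getD_cons_succ, ih]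
                simp [pvG]

theorem pvB_eq (message : String) :
    get_message_vector_alt message
    = (List.range ((message.toList.length + 1) / 2)).map (pvRow message.toList) := by
  unfold get_message_vector_alt
  dsimp only
  simp only [pvPad_eq]
  rw [pvChunk2_pad]
  simp only [List.length_map]
  apply List.map_congr_left
  intro i _
  simp only [pvRow]
  rw [← pvGetD_map, ← pvGetD_map]

-- ===== VERDICT (by name: the statement is the Claim_ definition above) =====
theorem get_message_vector_spec : Claim_equal_get_message_vector := by
  intro message _
  unfold Spec_get_message_vector
  have hs : (if message.toList.length % 2 = 0 then message.toList.length / 2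
      else message.toList.length / 2 + 1) = (message.toList.length + 1) / 2 := by
    split_ifs <;> omega
  rw [pvA_eq, hs, pvB_eq]
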